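-- pv_equiv track=rewrite | github.com/parveenchahal/DS-Algo | make_sum_divisible_by_p.py | minSubarray
-- ===== SOURCE A (Python) =====
-- from typing import List
--
-- def minSubarray(nums: List[int], p: int) -> int:
--     n = len(nums)
--     r = sum(nums) % p
--     if r == 0:
--         return 0
--     sum_so_far = 0
--     m = {0: -1}
--     MAX = n
--     res = MAX
--     for i, x in enumerate(nums):
--         sum_so_far += x
--         sum_so_far = sum_so_far % p
--         m[sum_so_far] = i
--         t = (sum_so_far - r) % p
--         if t in m:
--             res = min(res, i - m[t])
--     return res if res < n else -1
-- ===== SOURCE B (Python) =====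
-- def minSubarray(nums, p):
--     total = sum(nums) % p
--     if total == 0:
--         return 0
--     pre = [0]
--     for x in nums:
--         pre.append((pre[-1] + x) % p)
--     n = len(nums)
--     best = n
--     for i in range(1, n + 1):
--         t = (pre[i] - total) % p
--         for j in range(i - 1, -1, -1):
--             if pre[j] == t:
--                 best = min(best, i - j)
--                 break
--     return best if best < n else -1
-- ===== Notes on version B (the rewrite author's own statement) =====
-- stated objective: alternative
-- what changed: Replaces the single-pass prefix-remainder hashmap with an explicitly built prefix-remainder list and, for each end index, a backward scan for the nearest matching earlier prefix remainder; no dictionary is used.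
import Mathlib
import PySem

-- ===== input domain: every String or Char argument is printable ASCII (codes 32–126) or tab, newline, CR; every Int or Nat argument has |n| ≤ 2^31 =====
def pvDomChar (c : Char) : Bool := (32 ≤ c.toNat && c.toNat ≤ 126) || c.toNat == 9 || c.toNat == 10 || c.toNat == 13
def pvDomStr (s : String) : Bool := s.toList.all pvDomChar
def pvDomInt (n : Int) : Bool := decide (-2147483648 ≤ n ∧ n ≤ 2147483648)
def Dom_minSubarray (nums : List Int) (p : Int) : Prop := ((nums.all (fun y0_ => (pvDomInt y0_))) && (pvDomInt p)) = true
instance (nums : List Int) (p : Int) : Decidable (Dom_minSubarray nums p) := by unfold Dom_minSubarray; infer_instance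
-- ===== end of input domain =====

-- B replaces A's one-pass prefix-remainder hashmap by a prefix-remainder list plus a backward
-- scan per end index (no dictionary); alternative decomposition, not faster (O(n^2) vs O(n)).

-- ===== PORT A =====
-- loop body of A's 'for i, x in enumerate(nums)': state = (sum_so_far, m, res)
def minSubarrayBody (p r : Int) (st : Int × PySem.Dict Int Int × Int) (ix : Int × Int) :
    Int × PySem.Dict Int Int × Int :=
  let s := PySem.Int.mod (st.1 + ix.2) p
  let m := st.2.1.insert s ix.1
  let t := PySem.Int.mod (s - r) p
  let res := if m.contains t then min st.2.2 (ix.1 - m.getD t 0) else st.2.2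
  (s, m, res)

def minSubarray (nums : List Int) (p : Int) : Int :=
  let n : Int := nums.length
  let r := PySem.Int.mod nums.sum p
  if r = 0 then 0
  else
    let res := ((PySem.List.enumerate nums 0).foldl (minSubarrayBody p r)
      (0, (PySem.Dict.empty : PySem.Dict Int Int).insert 0 (-1), n)).2.2
    if res < n then res else -1

-- ===== PORT B =====
-- inner 'for j in range(i-1, -1, -1): if pre[j] == t: best = min(best, i-j); break'
def scanBack (pre : List Int) (t i best : Int) : List Int → Int
  | [] => best
  | j :: js => if PySem.List.pyGetD pre j 0 = t then min best (i - j) else scanBack pre t i best js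

-- body of B's outer 'for i in range(1, n+1)'
def altStep (pre : List Int) (total p : Int) (best i : Int) : Int :=
  let t := PySem.Int.mod (PySem.List.pyGetD pre i 0 - total) p
  scanBack pre t i best (PySem.List.pyRange (i - 1) (-1) (-1))

def minSubarray_alt (nums : List Int) (p : Int) : Int :=
  let total := PySem.Int.mod nums.sum p
  if total = 0 then 0
  else
    let pre := nums.foldl
      (fun acc x => acc ++ [PySem.Int.mod (PySem.List.pyGetD acc (-1) 0 + x) p]) [0]
    let n : Int := nums.length
    let best := (PySem.List.pyRange 1 (n + 1) 1).foldl (altStep pre total p) n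
    if best < n then best else -1

-- ===== PRECONDITION & SPEC =====
-- Python raises ZeroDivisionError on p = 0 (both A and B); nothing else is excluded.
def Pre_minSubarray (nums : List Int) (p : Int) : Prop := p ≠ 0
instance (nums : List Int) (p : Int) : Decidable (Pre_minSubarray nums p) := by
  unfold Pre_minSubarray; infer_instance
def pvWitness_minSubarray : List Int × Int := ([1, 2, 3, 4], 5)

def Spec_minSubarray (nums : List Int) (p : Int) (out : Int) : Prop := out = minSubarray_alt nums p
instance (nums : List Int) (p : Int) (out : Int) : Decidable (Spec_minSubarray nums p out) := by
  unfold Spec_minSubarray; infer_instance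

-- ===== CLAIM (what is proved, stated in full; the proofs are below) =====
def Claim_equal_minSubarray : Prop := ∀ (nums : List Int) (p : Int), Dom_minSubarray nums p → Pre_minSubarray nums p → Spec_minSubarray nums p (minSubarray nums p)

-- ===== LEMMAS AND PROOFS =====

-- the list of prefix remainders, starting from s
def preL (p : Int) : Int → List Int → List Int
  | s, [] => [s]
  | s, x :: xs => s :: preL p (PySem.Int.mod (s + x) p) xs

-- first index j in js with pre[j] = t (js is a descending index list)
def findBack (pre : List Int) (t : Int) : List Int → Option Int
  | [] => none
  | j :: js => if PySem.List.pyGetD pre j 0 = t then some j else findBack pre t js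

theorem scanBack_eq_findBack (pre : List Int) (t i best : Int) (js : List Int) :
    scanBack pre t i best js =
      match findBack pre t js with
      | some j => min best (i - j)
      | none => best := by
  induction js with
  | nil => rfl
  | cons j js ih => simp only [scanBack, findBack]; split_ifs <;> simp [ih]

theorem preL_head (p s : Int) (xs : List Int) : (preL p s xs).getD 0 0 = s := by
  cases xs <;> rfl

theorem preL_build (p : Int) (xs : List Int) :
    ∀ (acc : List Int) (h : acc ≠ []),
      xs.foldl (fun acc x => acc ++ [PySem.Int.mod (PySem.List.pyGetD acc (-1) 0 + x) p]) acc
        = acc.dropLast ++ preL p (acc.getLast h) xs := by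
  induction xs with
  | nil => intro acc h; simp [preL]; exact (List.dropLast_append_getLast h).symm
  | cons x xs ih =>
    intro acc h
    simp only [List.foldl_cons]
    rw [PySem.List.pyGetD_neg_one acc 0 h]
    rw [ih (acc ++ [PySem.Int.mod (acc.getLast h + x) p]) (by simp)]
    simp only [preL, List.dropLast_concat, List.getLast_append_singleton]
    conv_rhs => rw [← List.singleton_append, ← List.append_assoc, List.dropLast_append_getLast h]

theorem mod_sub_ne (p r a : Int) (hr : ¬ p ∣ r) : PySem.Int.mod (a - r) p ≠ a := by
  intro h
  apply hr
  have hd := PySem.Int.floordiv_mul_add_mod (a - r) p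
  exact ⟨-(PySem.Int.floordiv (a - r) p), by linarith⟩

theorem not_dvd_mod (p s : Int) (hr : PySem.Int.mod s p ≠ 0) : ¬ p ∣ PySem.Int.mod s p := by
  intro hdvd
  apply hr
  have hd := PySem.Int.floordiv_mul_add_mod s p
  have hds : p ∣ s := by
    obtain ⟨c, hc⟩ := hdvd
    exact ⟨PySem.Int.floordiv s p + c, by linarith⟩
  rw [(PySem.Int.mod_eq_zero_iff_dvd s p).mpr hds]

-- main loop invariant: A's fold over the remaining elements returns the same res as B's fold
theorem main_loop (p r : Int) (hr : ¬ p ∣ r) :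
    ∀ (rest : List Int) (k : Nat) (L : List Int) (s : Int) (m : PySem.Dict Int Int) (res : Int),
      L.drop k = preL p s rest →
      (∀ t, m.get? t =
        (findBack L t (PySem.List.pyRange (k : Int) (-1) (-1))).map (fun j => j - 1)) →
      ((PySem.List.enumerate rest (k : Int)).foldl (minSubarrayBody p r) (s, m, res)).2.2
        = (PySem.List.pyRange ((k : Int) + 1) ((k : Int) + rest.length + 1) 1).foldl
            (altStep L r p) res := by
  intro rest
  induction rest with
  | nil =>
    intro k L s m res hL hm
    rw [PySem.List.pyRange_one_eq_nil (by simp)]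
    rfl
  | cons x xs ih =>
    intro k L s m res hL hm
    -- abbreviations for the step values
    set s' := PySem.Int.mod (s + x) p with hs'
    have hLk1 : L.drop (k + 1) = preL p s' xs := by
      rw [← List.tail_drop, hL]; rfl
    have hget : PySem.List.pyGetD L ((k : Int) + 1) 0 = s' := by
      have : ((k : Int) + 1) = ((k + 1 : Nat) : Int) := by push_cast; ring
      rw [this, PySem.List.pyGetD_natCast]
      have : L.getD (k + 1) 0 = (L.drop (k + 1)).getD 0 0 := by
        cases hge : L.drop (k + 1) with
        | nil => rw [hLk1] at hge; cases xs <;> simp [preL] at hge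
        | cons a l =>
          simp only [List.getD_eq_getElem?_getD]
          have h0 : (L.drop (k + 1))[0]? = L[k + 1 + 0]? := List.getElem?_drop
          rw [hge] at h0
          rw [← h0]
      rw [this, hLk1, preL_head]
    have hne : PySem.Int.mod (s' - r) p ≠ s' := mod_sub_ne p r s' hr
    have hmem' : ∀ t, (m.insert s' (k : Int)).get? t =
        (findBack L t (PySem.List.pyRange ((k : Int) + 1) (-1) (-1))).map (fun j => j - 1) := by
      intro t
      rw [PySem.List.pyRange_neg_one_cons (by omega : (-1 : Int) < (k : Int) + 1)]
      by_cases ht : t = s'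
      · subst ht
        rw [PySem.Dict.get?_insert_self]
        simp [findBack, hget]
      · rw [PySem.Dict.get?_insert_of_ne _ _ ht, hm t]
        simp only [findBack, hget]
        rw [if_neg (fun h => ht h.symm)]
        have : (k : Int) + 1 - 1 = (k : Int) := by ring
        rw [this]
    -- unfold one step on each side
    rw [PySem.List.enumerate_cons, List.foldl_cons]
    rw [PySem.List.pyRange_one_cons (by push_cast [List.length_cons]; omega), List.foldl_cons]
    have hstep : minSubarrayBody p r (s, m, res) ((k : Int), x)
        = (s', m.insert s' (k : Int), altStep L r p res ((k : Int) + 1)) := by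
      simp only [minSubarrayBody, altStep]
      refine Prod.ext rfl (Prod.ext rfl ?_)
      simp only [hget]
      have harg : (k : Int) + 1 - 1 = (k : Int) := by ring
      have hfb : findBack L (PySem.Int.mod (s' - r) p) (PySem.List.pyRange ((k : Int) + 1) (-1) (-1))
          = findBack L (PySem.Int.mod (s' - r) p) (PySem.List.pyRange ((k : Int)) (-1) (-1)) := by
        rw [PySem.List.pyRange_neg_one_cons (by omega : (-1 : Int) < (k : Int) + 1)]
        simp only [findBack, hget]
        rw [if_neg (fun h => hne h.symm), harg]
      rw [harg, scanBack_eq_findBack, PySem.Dict.contains_eq_isSome_get?, hmem' _, hfb]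
      cases hf : findBack L (PySem.Int.mod (s' - r) p) (PySem.List.pyRange ((k : Int)) (-1) (-1)) with
      | none => simp
      | some j =>
        simp only [Option.map_some, Option.isSome_some, if_true]
        have hg : (m.insert s' (k : Int)).getD (PySem.Int.mod (s' - r) p) 0 = j - 1 := by
          rw [PySem.Dict.getD_eq_get?_getD, hmem' _, hfb, hf]; rfl
        rw [hg, show (k : Int) - (j - 1) = (k : Int) + 1 - j from by ring]
    rw [hstep]
    have := ih (k + 1) L s' (m.insert s' (k : Int)) (altStep L r p res ((k : Int) + 1)) hLk1
      (by exact_mod_cast hmem')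
    have hcast : ((k + 1 : Nat) : Int) = (k : Int) + 1 := by push_cast; ring
    rw [hcast] at this
    rw [this]
    congr 2
    push_cast [List.length_cons]
    ring

-- ===== VERDICT (by name: the statement is the Claim_ definition above) =====
theorem minSubarray_spec : Claim_equal_minSubarray := by
  intro nums p _ hp
  unfold Spec_minSubarray minSubarray minSubarray_alt
  simp only []
  by_cases hr : PySem.Int.mod nums.sum p = 0
  · simp [hr]
  · rw [if_neg hr, if_neg hr]
    have hdvd : ¬ p ∣ PySem.Int.mod nums.sum p := not_dvd_mod p nums.sum hr
    have hpre : nums.foldl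
        (fun acc x => acc ++ [PySem.Int.mod (PySem.List.pyGetD acc (-1) 0 + x) p]) [0]
        = preL p 0 nums := by
      rw [preL_build p nums [0] (by simp)]; rfl
    rw [hpre]
    have hm0 : ∀ t, ((PySem.Dict.empty : PySem.Dict Int Int).insert 0 (-1)).get? t =
        (findBack (preL p 0 nums) t (PySem.List.pyRange ((0 : Nat) : Int) (-1) (-1))).map
          (fun j => j - 1) := by
      intro t
      rw [show ((0 : Nat) : Int) = 0 from rfl,
        PySem.List.pyRange_neg_one_cons (by omega : (-1 : Int) < 0),
        show (0 : Int) - 1 = -1 from by ring,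
        PySem.List.pyRange_neg_one_eq_nil (by omega : (-1 : Int) ≤ -1)]
      have h0 : PySem.List.pyGetD (preL p 0 nums) (0 : Int) 0 = 0 := by
        rw [PySem.List.pyGetD_zero, preL_head]
      by_cases ht : t = 0
      · subst ht
        rw [PySem.Dict.get?_insert_self]
        simp [findBack, h0]
      · rw [PySem.Dict.get?_insert_of_ne _ _ ht, PySem.Dict.get?_empty]
        simp only [findBack, h0]
        rw [if_neg fun h => ht (Eq.symm h)]
        rfl
    have hmain := main_loop p (PySem.Int.mod nums.sum p) hdvd nums 0 (preL p 0 nums) 0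
      ((PySem.Dict.empty : PySem.Dict Int Int).insert 0 (-1)) (nums.length : Int) rfl hm0
    simp only [Nat.cast_zero, zero_add] at hmain
    rw [hmain]
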